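-- pv_equiv track=rewrite | github.com/josedf2501/Lazor-project | Lazor_Game.py | If_Win
-- ===== SOURCE A (Python) =====
-- def If_Win(points_position, lazer_path):
--     #merge all lazer_path to all points.
--     all_points_in_path = set()
--     for path in lazer_path:
--         for point in path:
--             all_points_in_path.add(point)
--     #for each points in points_position, if all points is part of lazor_path then win, otherwise lose.
--     for point in points_position:
--         if point not in all_points_in_path:
--             return False
--     return True
-- ===== SOURCE B (Python) =====
-- def If_Win(points_position, lazer_path):
--     # Maintain the set of target points not yet covered; one pass over the
--     # paths subtracts each path, stopping early once nothing remains.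
--     remaining = set(points_position)
--     for path in lazer_path:
--         if not remaining:
--             break
--         remaining.difference_update(path)
--     return not remaining
-- ===== Notes on version B (the rewrite author's own statement) =====
-- stated objective: alternative
-- what changed: Inverts the maintained state: instead of merging all path points into a set and then testing each target, B keeps the set of still-uncovered targets and makes a single pass over the paths subtracting each one (with early exit when empty), answering whether the remainder is empty.
import Mathlib
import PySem

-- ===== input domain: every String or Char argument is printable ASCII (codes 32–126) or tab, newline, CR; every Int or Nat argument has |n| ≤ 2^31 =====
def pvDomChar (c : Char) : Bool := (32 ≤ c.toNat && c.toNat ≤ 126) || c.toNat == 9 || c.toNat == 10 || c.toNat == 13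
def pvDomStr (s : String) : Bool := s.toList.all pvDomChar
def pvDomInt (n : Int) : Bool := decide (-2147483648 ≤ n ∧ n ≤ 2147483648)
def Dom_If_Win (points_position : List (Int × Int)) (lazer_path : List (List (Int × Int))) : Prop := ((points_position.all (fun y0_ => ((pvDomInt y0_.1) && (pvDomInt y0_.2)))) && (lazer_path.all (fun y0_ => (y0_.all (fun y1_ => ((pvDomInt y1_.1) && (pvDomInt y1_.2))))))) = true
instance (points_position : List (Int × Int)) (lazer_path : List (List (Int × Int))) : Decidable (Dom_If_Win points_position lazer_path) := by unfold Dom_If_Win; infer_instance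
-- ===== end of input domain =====

-- B inverts the maintained state: instead of merging all path points into a set and checking targets, it keeps the set of uncovered targets, subtracting each path in one pass with early exit (alternative decomposition, same cost).


-- ===== PORT A =====
-- 'for point in points_position: if point not in all_points_in_path: return False' / 'return True'
def If_Win_loop (s : PySem.Set (Int × Int)) : List (Int × Int) → Bool
  | [] => true
  | point :: rest =>
    if ¬ (PySem.Set.contains s point = true) then false
    else If_Win_loop s rest

def If_Win (points_position : List (Int × Int)) (lazer_path : List (List (Int × Int))) : Bool :=
  -- all_points_in_path = set(); nested for-loops adding each point
  let all_points_in_path : PySem.Set (Int × Int) :=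
    lazer_path.foldl (fun s path => path.foldl (fun s point => PySem.Set.add s point) s) PySem.Set.empty
  If_Win_loop all_points_in_path points_position

-- ===== PORT B =====
-- 'for path in lazer_path: if not remaining: break; remaining.difference_update(path)'
def If_Win_alt_loop (remaining : PySem.Set (Int × Int)) : List (List (Int × Int)) → PySem.Set (Int × Int)
  | [] => remaining
  | path :: rest =>
    if remaining.isEmpty then remaining
    else If_Win_alt_loop (PySem.Set.diff remaining path) rest

def If_Win_alt (points_position : List (Int × Int)) (lazer_path : List (List (Int × Int))) : Bool :=
  -- remaining = set(points_position); loop; return not remaining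
  (If_Win_alt_loop (PySem.Set.ofList points_position) lazer_path).isEmpty

-- ===== PRECONDITION & SPEC =====
def Spec_If_Win (points_position : List (Int × Int)) (lazer_path : List (List (Int × Int))) (out : Bool) : Prop := out = If_Win_alt points_position lazer_path
instance (points_position : List (Int × Int)) (lazer_path : List (List (Int × Int))) (out : Bool) : Decidable (Spec_If_Win points_position lazer_path out) := by unfold Spec_If_Win; infer_instance

-- ===== CLAIM (what is proved, stated in full; the proofs are below) =====
def Claim_equal_If_Win : Prop := ∀ (points_position : List (Int × Int)) (lazer_path : List (List (Int × Int))), Dom_If_Win points_position lazer_path → Spec_If_Win points_position lazer_path (If_Win points_position lazer_path)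

-- ===== LEMMAS AND PROOFS =====
theorem mem_foldl_add (path : List (Int × Int)) (s : PySem.Set (Int × Int)) (x : Int × Int) :
    x ∈ path.foldl (fun s point => PySem.Set.add s point) s ↔ x ∈ s ∨ x ∈ path := by
  induction path generalizing s with
  | nil => simp
  | cons p rest ih =>
    simp [List.foldl, ih, PySem.Set.mem_add]
    tauto

theorem mem_built_set (lazer_path : List (List (Int × Int))) (s : PySem.Set (Int × Int)) (x : Int × Int) :
    x ∈ lazer_path.foldl (fun s path => path.foldl (fun s point => PySem.Set.add s point) s) s
      ↔ x ∈ s ∨ ∃ path ∈ lazer_path, x ∈ path := by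
  induction lazer_path generalizing s with
  | nil => simp
  | cons p rest ih =>
    simp [List.foldl, ih, mem_foldl_add]
    tauto

theorem loop_eq_all (s : PySem.Set (Int × Int)) (pts : List (Int × Int)) :
    If_Win_loop s pts = pts.all (fun point => PySem.Set.contains s point) := by
  induction pts with
  | nil => rfl
  | cons p rest ih =>
    simp [If_Win_loop, ih]

theorem mem_alt_loop (paths : List (List (Int × Int))) (r : PySem.Set (Int × Int)) (x : Int × Int) :
    x ∈ If_Win_alt_loop r paths ↔ x ∈ r ∧ ∀ p ∈ paths, x ∉ p := by
  induction paths generalizing r with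
  | nil => simp [If_Win_alt_loop]
  | cons p rest ih =>
    by_cases h : r.isEmpty
    · have hr : r = [] := by simpa [List.isEmpty_iff] using h
      simp [If_Win_alt_loop, hr]
    · have hstep : If_Win_alt_loop r (p :: rest) = If_Win_alt_loop (PySem.Set.diff r p) rest := by
        rw [If_Win_alt_loop, if_neg h]
      rw [hstep, ih, PySem.Set.mem_diff]
      constructor
      · rintro ⟨⟨hx, hnp⟩, hrest⟩
        refine ⟨hx, fun q hq => ?_⟩
        rcases List.mem_cons.mp hq with rfl | hq'
        · exact hnp
        · exact hrest q hq'
      · rintro ⟨hx, hall⟩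
        exact ⟨⟨hx, hall p (by simp)⟩, fun q hq => hall q (by simp [hq])⟩

-- ===== VERDICT (by name: the statement is the Claim_ definition above) =====
theorem If_Win_spec : Claim_equal_If_Win := by
  intro pts paths _
  unfold Spec_If_Win If_Win If_Win_alt
  rw [loop_eq_all]
  rw [Bool.eq_iff_iff]
  simp only [List.all_eq_true, List.isEmpty_iff, List.eq_nil_iff_forall_not_mem]
  constructor
  · intro h x hx
    rw [mem_alt_loop] at hx
    obtain ⟨hmem, hnone⟩ := hx
    have hc := h x (by simpa using (PySem.Set.mem_ofList (xs := pts) (y := x)).mp hmem)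
    rw [PySem.Set.contains_iff, mem_built_set] at hc
    rcases hc with hc | ⟨p, hp, hxp⟩
    · simp [PySem.Set.empty] at hc
    · exact hnone p hp hxp
  · intro h x hx
    rw [PySem.Set.contains_iff, mem_built_set]
    by_contra hc
    push Not at hc
    exact h x ((mem_alt_loop paths _ x).mpr
      ⟨(PySem.Set.mem_ofList (xs := pts) (y := x)).mpr hx, fun p hp hxp => hc.2 p hp hxp⟩)
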